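-- pv_equiv track=rewrite | github.com/redweasl/AOCPython2025 | AOCDay7/dayseven.py | trace_timelines
-- ===== SOURCE A (Python) =====
-- def trace_timelines(map, x, y):
--     if y + 1 == len(map):
--         return 1 # Timeline reaches end
--     elif x < 0 or x >= len(map[0]):
--         return 0 # Timeline terminated by going off map
--     elif map[y][x] == "^":
--         return trace_timelines(map, x - 1, y + 1) + trace_timelines(map, x + 1, y + 1)
--     else:
--         return trace_timelines(map, x, y + 1)
-- ===== SOURCE B (Python) =====
-- def _get(dp, i, width):
--     # dp is None for the (virtual) bottom row, where every column counts 1;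
--     # otherwise columns outside [0, width) contribute 0.
--     if dp is None:
--         return 1
--     if 0 <= i < width:
--         return dp[i]
--     return 0
--
--
-- def trace_timelines(map, x, y):
--     # Bottom-up row DP: one array of per-column timeline counts per row,
--     # instead of A's branching recursion.
--     n = len(map)
--     if y + 1 == n:
--         return 1
--     width = len(map[0])
--     if x < 0 or x >= width:
--         return 0
--     dp = None
--     for step in range(n - 1 - y):
--         r = n - 2 - step
--         row = map[r]
--         new = []
--         for i in range(width):
--             if row[i] == "^":
--                 new.append(_get(dp, i - 1, width) + _get(dp, i + 1, width))
--             else: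
--                 new.append(_get(dp, i, width))
--         dp = new
--     return dp[x]
-- ===== Notes on version B (the rewrite author's own statement) =====
-- stated objective: faster
-- what changed: Replaced A's top-down branching recursion (which re-explores subtrees and is exponential on '^'-dense maps) with a bottom-up dynamic program keeping one array of per-column timeline counts per row.
-- outside the precondition, e.g. on trace_timelines(['ab', 'c', 'dd'], 0, 0): A returns 1, B raises IndexError
import Mathlib
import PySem

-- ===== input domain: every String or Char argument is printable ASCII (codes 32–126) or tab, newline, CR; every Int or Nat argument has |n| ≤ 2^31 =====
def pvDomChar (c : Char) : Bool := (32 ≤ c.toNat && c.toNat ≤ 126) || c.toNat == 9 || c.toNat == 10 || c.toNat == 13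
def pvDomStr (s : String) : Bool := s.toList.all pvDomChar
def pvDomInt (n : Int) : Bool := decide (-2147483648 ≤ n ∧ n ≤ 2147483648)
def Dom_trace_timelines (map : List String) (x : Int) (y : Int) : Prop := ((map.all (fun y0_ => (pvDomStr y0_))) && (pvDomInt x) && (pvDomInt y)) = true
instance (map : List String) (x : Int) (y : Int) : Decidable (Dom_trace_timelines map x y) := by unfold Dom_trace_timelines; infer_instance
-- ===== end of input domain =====

-- B replaces A's exponential branching recursion by a bottom-up row DP (one count
-- per column per row); proved equal to A on Pre_trace_timelines.

-- map[r][i] as an Option (none exactly where Python raises IndexError); shared accessor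
def pvCharAt (map : List String) (r i : Int) : Option Char :=
  (PySem.List.pyGet? map r).bind (fun row => PySem.Str.pyGet? row i)

-- len(map[0]) (only evaluated by either Python after the y+1==len(map) test;
-- inside Pre_ the map is nonempty whenever this is reached, so headD is exact there)
def pvWidth (map : List String) : Int := ((map.headD "").toList.length : Int)

-- ===== PORT A =====
-- A's recursion, step for step; the fuel only makes it total (Python diverges/raises
-- exactly outside Pre_, where nothing is claimed), it is exactly the number of rows left.
def traceA (map : List String) (fuel : Nat) (x y : Int) : Int :=
  match fuel with
  | 0 => 0
  | f + 1 =>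
    if y + 1 = (map.length : Int) then 1
    else if x < 0 ∨ pvWidth map ≤ x then 0
    else if pvCharAt map y x = some '^' then
      traceA map f (x - 1) (y + 1) + traceA map f (x + 1) (y + 1)
    else traceA map f x (y + 1)

def trace_timelines (map : List String) (x : Int) (y : Int) : Int :=
  traceA map ((map.length : Int) - y).toNat x y

-- ===== PORT B =====
-- _get(dp, i, width) of Source B
def pvGetDp (dp : Option (List Int)) (i width : Int) : Int :=
  match dp with
  | none => 1
  | some l => if 0 ≤ i ∧ i < width then l.getD i.toNat 0 else 0

-- one iteration of Source B's outer loop (row r = n - 2 - step)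
def pvStep (map : List String) (width n : Int) (dp : Option (List Int)) (step : Nat) : Option (List Int) :=
  let r : Int := n - 2 - (step : Int)
  some ((List.range width.toNat).map (fun (iN : Nat) =>
    if pvCharAt map r (iN : Int) = some '^' then
      pvGetDp dp ((iN : Int) - 1) width + pvGetDp dp ((iN : Int) + 1) width
    else pvGetDp dp (iN : Int) width))

def trace_timelines_alt (map : List String) (x : Int) (y : Int) : Int :=
  let n : Int := (map.length : Int)
  if y + 1 = n then 1
  else
    let width := pvWidth map
    if x < 0 ∨ width ≤ x then 0
    else
      let dp := (List.range (n - 1 - y).toNat).foldl (pvStep map width n) none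
      -- Source B's final dp[x]: inside Pre_ the loop ran ≥ 1 time and 0 ≤ x < width,
      -- so pvGetDp dp x width is exactly dp[x]
      pvGetDp dp x width

-- ===== PRECONDITION & SPEC =====
-- Pre_ = where Python A returns normally: the last-row shortcut, the off-map shortcut,
-- or a start row inside the (Python-wrapped) index range of a map whose rows are all at
-- least as long as row 0. The last disjunct is slightly narrower than necessary: A can
-- also return on a map with short rows when its path happens to miss the short cells,
-- but B's row DP reads every cell of each visited row (see claim.json cites).
def Pre_trace_timelines (map : List String) (x : Int) (y : Int) : Prop :=
  y + 1 = (map.length : Int)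
  ∨ (map ≠ [] ∧ (x < 0 ∨ pvWidth map ≤ x))
  ∨ (-(map.length : Int) ≤ y ∧ y + 1 < (map.length : Int)
      ∧ ∀ row ∈ map, pvWidth map ≤ (row.toList.length : Int))

instance (map : List String) (x : Int) (y : Int) : Decidable (Pre_trace_timelines map x y) := by
  unfold Pre_trace_timelines; infer_instance

def pvWitness_trace_timelines : List String × Int × Int := (["^^", ".."], 0, 0)

def Spec_trace_timelines (map : List String) (x : Int) (y : Int) (out : Int) : Prop := out = trace_timelines_alt map x y
instance (map : List String) (x : Int) (y : Int) (out : Int) : Decidable (Spec_trace_timelines map x y out) := by unfold Spec_trace_timelines; infer_instance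

-- ===== CLAIM (what is proved, stated in full; the proofs are below) =====
def Claim_equal_trace_timelines : Prop := ∀ (map : List String) (x : Int) (y : Int), Dom_trace_timelines map x y → Pre_trace_timelines map x y → Spec_trace_timelines map x y (trace_timelines map x y)

-- ===== LEMMAS AND PROOFS =====

-- DP invariant: after k steps of B's fold, the dp row (read through _get) holds exactly
-- A's counts for row n-1-k, with fuel k+1 (= exactly the rows left). Unconditional.
theorem pv_inv (map : List String) (k : Nat) :
    ∀ i : Int,
      pvGetDp ((List.range k).foldl (pvStep map (pvWidth map) (map.length : Int)) none) i (pvWidth map)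
        = traceA map (k + 1) i ((map.length : Int) - 1 - (k : Int)) := by
  induction k with
  | zero =>
      intro i
      simp [pvGetDp, traceA]
  | succ k ih =>
      intro i
      rw [List.range_succ, List.foldl_append]
      simp only [List.foldl_cons, List.foldl_nil, pvStep]
      by_cases hlo : 0 ≤ i
      · by_cases hhi : i < pvWidth map
        · -- in range: the new row's entry at i.toNat vs one unfolding of traceA
          have hR : traceA map (k + 1 + 1) i ((map.length : Int) - 1 - ((k + 1 : Nat) : Int))
              = if pvCharAt map ((map.length : Int) - 2 - (k : Int)) i = some '^' then
                  traceA map (k + 1) (i - 1) ((map.length : Int) - 1 - (k : Int)) +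
                    traceA map (k + 1) (i + 1) ((map.length : Int) - 1 - (k : Int))
                else traceA map (k + 1) i ((map.length : Int) - 1 - (k : Int)) := by
            rw [traceA]
            rw [if_neg (by push_cast; omega)]
            rw [if_neg (by omega)]
            have h2 : (map.length : Int) - 1 - ((k + 1 : Nat) : Int) + 1
                = (map.length : Int) - 1 - (k : Int) := by push_cast; ring
            have h1 : (map.length : Int) - 1 - ((k + 1 : Nat) : Int)
                = (map.length : Int) - 2 - (k : Int) := by push_cast; ring
            rw [h2, h1]
          rw [hR]
          have hiN : i.toNat < (pvWidth map).toNat := by omega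
          have hcast : ((i.toNat : Nat) : Int) = i := by omega
          have houter : ∀ l : List Int, pvGetDp (some l) i (pvWidth map)
              = if 0 ≤ i ∧ i < pvWidth map then l.getD i.toNat 0 else 0 := fun l => rfl
          rw [houter, if_pos ⟨hlo, hhi⟩]
          rw [List.getD_eq_getElem?_getD, List.getElem?_map, List.getElem?_range hiN]
          simp only [Option.map_some, Option.getD_some, hcast]
          split_ifs with hc
          · rw [ih (i - 1), ih (i + 1)]
          · rw [ih i]
        · -- i ≥ width: both sides 0
          have houter : ∀ l : List Int, pvGetDp (some l) i (pvWidth map)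
              = if 0 ≤ i ∧ i < pvWidth map then l.getD i.toNat 0 else 0 := fun l => rfl
          rw [houter, if_neg (by omega)]
          rw [traceA]
          rw [if_neg (by push_cast; omega)]
          rw [if_pos (by right; omega)]
      · -- i < 0: both sides 0
        have houter : ∀ l : List Int, pvGetDp (some l) i (pvWidth map)
            = if 0 ≤ i ∧ i < pvWidth map then l.getD i.toNat 0 else 0 := fun l => rfl
        rw [houter, if_neg (by omega)]
        rw [traceA]
        rw [if_neg (by push_cast; omega)]
        rw [if_pos (by left; omega)]

-- ===== VERDICT (by name: the statement is the Claim_ definition above) =====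
theorem trace_timelines_spec : Claim_equal_trace_timelines := by
  intro map x y _ hpre
  unfold Spec_trace_timelines trace_timelines trace_timelines_alt
  by_cases hbase : y + 1 = (map.length : Int)
  · -- both take the last-row shortcut
    rw [if_pos hbase]
    have : ((map.length : Int) - y).toNat = 1 := by omega
    rw [this, traceA, if_pos hbase]
  · rw [if_neg hbase]
    by_cases hx : x < 0 ∨ pvWidth map ≤ x
    · -- off-map shortcut on both sides
      rw [if_pos hx]
      rcases Nat.eq_zero_or_pos ((map.length : Int) - y).toNat with h0 | h1
      · rw [h0, traceA]
      · obtain ⟨f, hf⟩ : ∃ f, ((map.length : Int) - y).toNat = f + 1 := ⟨_, (Nat.succ_pred_eq_of_pos h1).symm⟩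
        rw [hf, traceA, if_neg hbase, if_pos hx]
    · -- main case: y ≤ n - 2 (from Pre_), x in range; use the DP invariant
      rw [if_neg hx]
      have hyn : y + 1 < (map.length : Int) := by
        rcases hpre with h | ⟨_, h⟩ | ⟨_, h, _⟩
        · exact absurd h hbase
        · exact absurd h hx
        · exact h
      have hk : (((map.length : Int) - 1 - y).toNat : Int) = (map.length : Int) - 1 - y := by omega
      have hfuel : ((map.length : Int) - y).toNat = ((map.length : Int) - 1 - y).toNat + 1 := by omega
      have := pv_inv map ((map.length : Int) - 1 - y).toNat x
      rw [hk] at this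
      have hrow : (map.length : Int) - 1 - ((map.length : Int) - 1 - y) = y := by ring
      rw [hrow] at this
      rw [hfuel, ← this]
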